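-- pv_equiv track=rewrite | github.com/iamdv43/PracticeDSA | minDiffStock.py | findEarliestMonth
-- ===== SOURCE A (Python) =====
-- def findEarliestMonth(stockPrice):
--     n = len(stockPrice)
--     minD = max(stockPrice)
--     for i in range(1,n):
--         avg1 = sum(stockPrice[:i]) // i
--         avg2 = sum(stockPrice[i:]) // (n-i)
--         if minD > abs(avg2 - avg1):
--             minD = abs(avg2 - avg1)
--             earliestMonth = i
--     return earliestMonth
-- ===== SOURCE B (Python) =====
-- def findEarliestMonth(stockPrice):
--     n = len(stockPrice)
--     total = sum(stockPrice)
--     best = max(stockPrice)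
--     month = None
--     pref = 0
--     for i in range(1, n):
--         pref += stockPrice[i - 1]
--         d = abs((total - pref) // (n - i) - pref // i)
--         if d < best:
--             best = d
--             month = i
--     return month
-- ===== Notes on version B (the rewrite author's own statement) =====
-- stated objective: faster
-- what changed: B keeps a running prefix sum and the list's total so each split's two half-sums are O(1), replacing A's per-split re-summation of both slices.
import Mathlib
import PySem

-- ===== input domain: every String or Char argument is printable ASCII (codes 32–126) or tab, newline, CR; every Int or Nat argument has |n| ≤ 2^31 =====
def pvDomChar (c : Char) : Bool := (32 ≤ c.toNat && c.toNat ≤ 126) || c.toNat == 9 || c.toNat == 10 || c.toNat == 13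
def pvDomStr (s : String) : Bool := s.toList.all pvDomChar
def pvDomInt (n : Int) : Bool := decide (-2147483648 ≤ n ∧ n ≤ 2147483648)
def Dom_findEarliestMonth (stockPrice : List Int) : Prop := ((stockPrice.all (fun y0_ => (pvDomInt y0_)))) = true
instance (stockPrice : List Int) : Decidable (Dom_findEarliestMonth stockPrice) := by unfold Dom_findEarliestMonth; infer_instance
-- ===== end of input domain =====

-- B replaces A's per-split slice re-summation by a running prefix sum plus the precomputed total (asymptotically faster).


-- ===== PORT A =====
-- loop body of A: recompute both slice sums at every split i
def stepA (stockPrice : List Int) (n : Int) (p : Int × Option Int) (i : Int) : Int × Option Int :=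
  let avg1 := PySem.Int.floordiv (PySem.List.slice stockPrice none (some i)).sum i
  let avg2 := PySem.Int.floordiv (PySem.List.slice stockPrice (some i) none).sum (n - i)
  if p.1 > |avg2 - avg1| then (|avg2 - avg1|, some i) else p

def findEarliestMonth (stockPrice : List Int) : Int :=
  let n : Int := stockPrice.length
  let minD : Int := (PySem.List.max? stockPrice (fun x => x)).getD 0   -- max([]) raises: excluded by Pre_
  let r := (PySem.List.pyRange 1 n 1).foldl (stepA stockPrice n) (minD, none)
  r.2.getD 0   -- 'earliestMonth' unassigned raises in Python: excluded by Pre_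

-- ===== PORT B =====
-- loop body of B: running prefix sum, O(1) per split
def stepB (stockPrice : List Int) (n total : Int) (s : Int × Int × Option Int) (i : Int) : Int × Int × Option Int :=
  let pref := s.1 + PySem.List.pyGetD stockPrice (i - 1) 0
  let d := |PySem.Int.floordiv (total - pref) (n - i) - PySem.Int.floordiv pref i|
  if d < s.2.1 then (pref, d, some i) else (pref, s.2.1, s.2.2)

def findEarliestMonth_alt (stockPrice : List Int) : Int :=
  let n : Int := stockPrice.length
  let total := stockPrice.sum
  let best := (PySem.List.max? stockPrice (fun x => x)).getD 0
  let r := (PySem.List.pyRange 1 n 1).foldl (stepB stockPrice n total) (0, best, none)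
  r.2.2.getD 0   -- Python B returns None here: excluded by Pre_

-- ===== PRECONDITION & SPEC =====
-- Pre_ = exactly the inputs where Python A returns: A raises on [] (max of empty) and raises
-- NameError when no split's |avg2-avg1| beats max(stockPrice) (earliestMonth never assigned);
-- Python B returns None (not an int) on those same inputs.
def Pre_findEarliestMonth (stockPrice : List Int) : Prop :=
  stockPrice ≠ [] ∧ ∃ i < stockPrice.length, 1 ≤ i ∧
    |PySem.Int.floordiv (stockPrice.drop i).sum ((stockPrice.length : Int) - i)
      - PySem.Int.floordiv (stockPrice.take i).sum i| < (PySem.List.max? stockPrice (fun x => x)).getD 0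
instance (stockPrice : List Int) : Decidable (Pre_findEarliestMonth stockPrice) := by
  unfold Pre_findEarliestMonth; infer_instance
def pvWitness_findEarliestMonth : List Int := [1, 5]

def Spec_findEarliestMonth (stockPrice : List Int) (out : Int) : Prop := out = findEarliestMonth_alt stockPrice
instance (stockPrice : List Int) (out : Int) : Decidable (Spec_findEarliestMonth stockPrice out) := by unfold Spec_findEarliestMonth; infer_instance

-- ===== CLAIM (what is proved, stated in full; the proofs are below) =====
def Claim_equal_findEarliestMonth : Prop := ∀ (stockPrice : List Int), Dom_findEarliestMonth stockPrice → Pre_findEarliestMonth stockPrice → Spec_findEarliestMonth stockPrice (findEarliestMonth stockPrice)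

-- ===== LEMMAS AND PROOFS =====

-- sum of the suffix = total minus prefix sum
lemma sum_drop (xs : List Int) (k : Nat) :
    (xs.drop k).sum = xs.sum - (xs.take k).sum := by
  have h := List.take_append_drop k xs
  have : (xs.take k).sum + (xs.drop k).sum = xs.sum := by
    rw [← List.sum_append, h]
  omega

-- the two loops keep equal (best, month) state, given B's prefix-sum invariant
lemma loop_eq (xs : List Int) :
    ∀ (k : Nat) (a : Int), 1 ≤ a → ((xs.length : Int) - a).toNat = k →
    ∀ (minD : Int) (em : Option Int),
      ((PySem.List.pyRange a (xs.length : Int) 1).foldl (stepB xs (xs.length : Int) xs.sum)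
          ((xs.take (a - 1).toNat).sum, minD, em)).2
      = (PySem.List.pyRange a (xs.length : Int) 1).foldl (stepA xs (xs.length : Int)) (minD, em) := by
  intro k
  induction k with
  | zero =>
    intro a ha hk minD em
    have hle : (xs.length : Int) ≤ a := by omega
    rw [PySem.List.pyRange_one_eq_nil hle]
    simp
  | succ k ih =>
    intro a ha hk minD em
    have halt : a < (xs.length : Int) := by omega
    rw [PySem.List.pyRange_one_cons halt]
    simp only [List.foldl_cons]
    -- index facts
    have h0 : 0 ≤ a - 1 := by omega
    have hidx : (a - 1).toNat < xs.length := by omega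
    have hpref : (xs.take (a - 1).toNat).sum + PySem.List.pyGetD xs (a - 1) 0
        = (xs.take a.toNat).sum := by
      rw [PySem.List.pyGetD_eq_getElem xs 0 h0 (by omega)]
      have : a.toNat = (a - 1).toNat + 1 := by omega
      rw [this, List.sum_take_succ xs _ hidx]
    have hslice1 : PySem.List.slice xs none (some a) = xs.take a.toNat :=
      PySem.List.slice_to xs (by omega)
    have hslice2 : PySem.List.slice xs (some a) none = xs.drop a.toNat :=
      PySem.List.slice_from xs (by omega)
    have hdrop : xs.sum - (xs.take a.toNat).sum = (xs.drop a.toNat).sum :=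
      (sum_drop xs a.toNat).symm
    -- the first step of each loop
    have hstep : stepB xs (xs.length : Int) xs.sum ((xs.take (a - 1).toNat).sum, minD, em) a
        = ((xs.take a.toNat).sum,
           stepA xs (xs.length : Int) (minD, em) a) := by
      simp only [stepB, stepA, hpref, hslice1, hslice2, hdrop, gt_iff_lt]
      split_ifs <;> rfl
    rw [hstep]
    have h1 : 1 ≤ a + 1 := by omega
    have h2 : ((xs.length : Int) - (a + 1)).toNat = k := by omega
    have h3 : (a + 1 - 1).toNat = a.toNat := by omega
    have := ih (a + 1) h1 h2 (stepA xs (xs.length : Int) (minD, em) a).1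
        (stepA xs (xs.length : Int) (minD, em) a).2
    rw [h3] at this
    simpa using this

-- ===== VERDICT (by name: the statement is the Claim_ definition above) =====
theorem findEarliestMonth_spec : Claim_equal_findEarliestMonth := by
  intro xs _ _
  unfold Spec_findEarliestMonth findEarliestMonth findEarliestMonth_alt
  dsimp only
  have h := loop_eq xs ((xs.length : Int) - 1).toNat 1 (by omega) rfl
      ((PySem.List.max? xs (fun x => x)).getD 0) none
  simp only [show ((1 : Int) - 1).toNat = 0 by omega, List.take_zero, List.sum_nil] at h
  rw [← h]
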